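-- pv_equiv track=rewrite | github.com/DrDonut326/AdventofCode | 2018/Day17.py | count_water_path
-- ===== SOURCE A (Python) =====
-- def count_water_path(grid, oob):  # Part 1
--     count = 0
--     water = {'<', '>', 'v', '%', '~'}
--     for row in grid:
--         for element in row:
--             if element in water:
--                 count += 1
--
--     # Handle water that went OOB
--     left_list = [z for z in oob if z[0] < 0]
--     right_list = [z for z in oob if z[0] > 0]
--
--     left_high = None
--     right_high = None
--
--     # For each list find the highest place it went OOB
--     if left_list:
--         left_high = min(left_list, key=lambda x: x[1])[1]
--     if right_list:
--         right_high = min(right_list, key=lambda x: x[1])[1]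
--
--     # Get the difference between the grid high and each high
--     if left_high is not None:
--         left_difference = (len(grid) - 2) - left_high
--         # Add to count
--         count += left_difference
--
--     if right_high is not None:
--         right_difference = (len(grid) - 2) - right_high
--         count += right_difference
--     return count
-- ===== SOURCE B (Python) =====
-- def count_water_path(grid, oob):  # Part 1
--     # Histogram of all grid cells, then read off the five water markers.
--     freq = {}
--     for row in grid:
--         for element in row:
--             freq[element] = freq.get(element, 0) + 1
--     count = sum(freq.get(w, 0) for w in ('<', '>', 'v', '%', '~'))
--
--     # Sort oob by height once; the first point on each side is the highest OOB spot.
--     top = len(grid) - 2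
--     ordered = sorted(oob, key=lambda z: z[1])
--     left = next((z for z in ordered if z[0] < 0), None)
--     right = next((z for z in ordered if z[0] > 0), None)
--     if left is not None:
--         count += top - left[1]
--     if right is not None:
--         count += top - right[1]
--     return count
-- ===== Notes on version B (the rewrite author's own statement) =====
-- stated objective: alternative
-- what changed: B counts water by building a cell-frequency dictionary and reading off the five marker entries instead of testing membership per cell, and finds each side's highest OOB point by sorting oob by height once and taking the first point with x<0 (resp. x>0) instead of filtering each side and calling min(key=...).
import Mathlib
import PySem

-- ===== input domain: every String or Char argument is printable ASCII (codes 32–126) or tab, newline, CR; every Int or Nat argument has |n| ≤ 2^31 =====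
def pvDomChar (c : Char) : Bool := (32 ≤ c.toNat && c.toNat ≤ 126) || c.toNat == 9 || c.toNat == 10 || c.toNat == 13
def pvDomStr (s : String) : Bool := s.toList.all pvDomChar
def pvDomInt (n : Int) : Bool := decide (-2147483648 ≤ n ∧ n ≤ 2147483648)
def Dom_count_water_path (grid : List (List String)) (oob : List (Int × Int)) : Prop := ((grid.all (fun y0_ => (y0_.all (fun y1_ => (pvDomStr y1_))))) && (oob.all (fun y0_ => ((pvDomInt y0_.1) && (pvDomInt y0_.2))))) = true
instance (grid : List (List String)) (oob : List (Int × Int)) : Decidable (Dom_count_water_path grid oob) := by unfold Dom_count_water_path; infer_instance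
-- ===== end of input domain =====

-- B counts water through a cell-frequency dictionary read off at the five markers, and replaces
-- the two filter + min(key=...) passes over oob by one sort-by-height followed by a
-- first-match lookup per side; objective: alternative (different data structures, same cost).

-- ===== PORT A =====
def pvWater : List String := ["<", ">", "v", "%", "~"]

-- `high = None; if lst: high = min(lst, key=lambda x: x[1])[1]` — min? is none exactly
-- when the list is empty, i.e. exactly when Python leaves the None sentinel in place
def pvHighOf (xs : List (Int × Int)) : Option Int :=
  match PySem.List.min? xs (fun x => x.2) with
  | some m => some m.2
  | none => none

def count_water_path (grid : List (List String)) (oob : List (Int × Int)) : Int :=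
  let count : Int :=
    grid.foldl (fun c row => row.foldl (fun c e => if e ∈ pvWater then c + 1 else c) c) 0
  let left_list := oob.filter (fun z => decide (z.1 < 0))
  let right_list := oob.filter (fun z => decide (z.1 > 0))
  let left_high : Option Int := pvHighOf left_list
  let right_high : Option Int := pvHighOf right_list
  let count : Int :=
    match left_high with
    | some lh => count + (((grid.length : Int) - 2) - lh)
    | none => count
  let count : Int :=
    match right_high with
    | some rh => count + (((grid.length : Int) - 2) - rh)
    | none => count
  count

-- ===== PORT B =====
def count_water_path_alt (grid : List (List String)) (oob : List (Int × Int)) : Int :=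
  -- freq[element] = freq.get(element, 0) + 1 over the nested loops
  let freq : PySem.Dict String Int :=
    grid.foldl (fun d row => row.foldl (fun d e => d.insert e (d.getD e 0 + 1)) d)
      PySem.Dict.empty
  -- sum(freq.get(w, 0) for w in ('<', '>', 'v', '%', '~'))
  let count : Int := pvWater.foldl (fun c w => c + freq.getD w 0) 0
  let top : Int := (grid.length : Int) - 2
  let ordered := PySem.List.sorted oob (fun z => z.2) false
  -- next((z for z in ordered if z[0] < 0), None) — the first match in the sorted list
  let left := ordered.find? (fun z => decide (z.1 < 0))
  let right := ordered.find? (fun z => decide (z.1 > 0))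
  let count : Int :=
    match left with
    | some l => count + (top - l.2)
    | none => count
  let count : Int :=
    match right with
    | some r => count + (top - r.2)
    | none => count
  count

-- ===== PRECONDITION & SPEC =====
def Spec_count_water_path (grid : List (List String)) (oob : List (Int × Int)) (out : Int) : Prop := out = count_water_path_alt grid oob
instance (grid : List (List String)) (oob : List (Int × Int)) (out : Int) : Decidable (Spec_count_water_path grid oob out) := by unfold Spec_count_water_path; infer_instance

-- ===== CLAIM (what is proved, stated in full; the proofs are below) =====
def Claim_equal_count_water_path : Prop := ∀ (grid : List (List String)) (oob : List (Int × Int)), Dom_count_water_path grid oob → Spec_count_water_path grid oob (count_water_path grid oob)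

-- ===== LEMMAS AND PROOFS =====

-- A's running if-count over a list of cells splits into the five per-marker counts
lemma pv_fold_split (l : List String) (c : Int) :
    l.foldl (fun c e => if e ∈ pvWater then c + 1 else c) c
      = c + l.count "<" + l.count ">" + l.count "v" + l.count "%" + l.count "~" := by
  induction l generalizing c with
  | nil => simp
  | cons a t ih =>
      rw [List.foldl_cons, ih]
      simp only [List.count_cons, pvWater, List.mem_cons, List.not_mem_nil, or_false,
        beq_iff_eq]
      by_cases h1 : a = "<" <;> by_cases h2 : a = ">" <;> by_cases h3 : a = "v" <;>
        by_cases h4 : a = "%" <;> by_cases h5 : a = "~" <;> simp_all <;> ring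

-- A's nested if-count flattens to a single fold over all cells
lemma pv_flat_count (grid : List (List String)) (c : Int) :
    grid.foldl (fun c row => row.foldl (fun c e => if e ∈ pvWater then c + 1 else c) c) c
      = (grid.flatMap (fun r => r)).foldl (fun c e => if e ∈ pvWater then c + 1 else c) c := by
  induction grid generalizing c with
  | nil => rfl
  | cons r rs ih => simp only [List.foldl_cons, List.flatMap_cons, List.foldl_append]; rw [ih]

-- B's nested histogram loop flattens to a single counter fold over all cells
lemma pv_flat_dict (grid : List (List String)) (d : PySem.Dict String Int) :
    grid.foldl (fun d row => row.foldl (fun d e => d.insert e (d.getD e 0 + 1)) d) d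
      = (grid.flatMap (fun r => r)).foldl (fun d e => d.insert e (d.getD e 0 + 1)) d := by
  induction grid generalizing d with
  | nil => rfl
  | cons r rs ih => simp only [List.foldl_cons, List.flatMap_cons, List.foldl_append]; rw [ih]

-- A's if-count equals B's sum of histogram entries at the five markers
lemma pv_count_bridge (l : List String) :
    l.foldl (fun c e => if e ∈ pvWater then c + 1 else c) (0 : Int)
      = pvWater.foldl
          (fun c w => c + (l.foldl (fun d e => d.insert e (d.getD e 0 + 1)) PySem.Dict.empty).getD w 0) 0 := by
  rw [pv_fold_split]
  simp only [pvWater, List.foldl_cons, List.foldl_nil,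
    PySem.Dict.getD_foldl_insert_add_one, PySem.Dict.getD_empty]
  ring

-- next(gen-expr, None) over the list is the head of the filtered list
lemma pv_find?_head?_filter {α : Type} (p : α → Bool) (l : List α) :
    l.find? p = (l.filter p).head? := by
  induction l with
  | nil => rfl
  | cons a t ih =>
      by_cases h : p a
      · rw [List.find?_cons_of_pos h, List.filter_cons_of_pos h, List.head?_cons]
      · rw [List.find?_cons_of_neg h, List.filter_cons_of_neg h, ih]

-- the first match on the height-sorted list carries the minimum height of the matching
-- points — i.e. exactly A's min(side_list, key=lambda x: x[1])[1] (with the same None case)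
lemma pv_side_eq (oob : List (Int × Int)) (p : Int × Int → Bool) :
    ((PySem.List.sorted oob (fun z => z.2) false).find? p).map (fun z => z.2)
      = pvHighOf (oob.filter p) := by
  rw [pv_find?_head?_filter]
  have hperm : ((PySem.List.sorted oob (fun z => z.2) false).filter p).Perm (oob.filter p) :=
    (PySem.List.sorted_perm oob (fun z => z.2) false).filter p
  have hpw : ((PySem.List.sorted oob (fun z => z.2) false).filter p).Pairwise
      (fun a b => a.2 ≤ b.2) :=
    (PySem.List.sorted_pairwise oob (fun z => z.2)).sublist List.filter_sublist
  cases hfs : (PySem.List.sorted oob (fun z => z.2) false).filter p with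
  | nil =>
      have : oob.filter p = [] := (hfs ▸ hperm).symm.eq_nil
      simp [this, pvHighOf, (PySem.List.min?_eq_none_iff _ _).mpr rfl]
  | cons m t =>
      unfold pvHighOf
      cases hm : PySem.List.min? (oob.filter p) (fun x => x.2) with
      | none =>
          have h0 := (PySem.List.min?_eq_none_iff _ _).mp hm
          rw [h0] at hperm
          rw [hfs] at hperm
          exact absurd hperm.eq_nil (by simp)
      | some w =>
          have hmin := PySem.List.min?_isMin hm
          have hwmem := PySem.List.min?_mem hm
          simp only [List.head?_cons, Option.map_some, Option.some.injEq]
          apply le_antisymm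
          · have hw' : w ∈ m :: t := (hfs ▸ hperm).symm.mem_iff.mp hwmem
            rw [hfs] at hpw
            rcases List.mem_cons.mp hw' with h | h
            · rw [h]
            · exact (List.pairwise_cons.mp hpw).1 w h
          · have hm' : m ∈ oob.filter p := (hfs ▸ hperm).mem_iff.mp List.mem_cons_self
            exact hmin m hm'

-- ===== VERDICT (by name: the statement is the Claim_ definition above) =====
theorem count_water_path_spec : Claim_equal_count_water_path := by
  intro grid oob _
  show count_water_path grid oob = count_water_path_alt grid oob
  unfold count_water_path count_water_path_alt
  simp only [pv_flat_count, pv_flat_dict]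
  rw [pv_count_bridge,
    ← pv_side_eq oob (fun z => decide (z.1 < 0)), ← pv_side_eq oob (fun z => decide (z.1 > 0))]
  cases h1 : (PySem.List.sorted oob (fun z => z.2) false).find? (fun z => decide (z.1 < 0)) <;>
    cases h2 : (PySem.List.sorted oob (fun z => z.2) false).find? (fun z => decide (z.1 > 0)) <;>
      simp
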